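-- pv_equiv track=rewrite | github.com/seungkyeom98/coding-test | 프로그래머스/2/389480. 완전범죄/완전범죄.py | solution
-- ===== SOURCE A (Python) =====
-- def solution(info, n, m):
--     # 최대 흔적 개수 설정 (최대 120)
--     INF = float('inf')
--     dp = [[[INF] * (m+1) for _ in range(n+1)] for _ in range(len(info) + 1)]
--
--     # 초기 상태 (흔적 없음)
--     dp[0][0][0] = 0
--
--     # DP 진행
--     for i in range(len(info)):
--         a_trace, b_trace = info[i]
--         for a in range(n+1):
--             for b in range(m+1):
--                 if dp[i][a][b] == INF:
--                     continue
--
--                 # A도둑이 훔치는 경우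
--                 if a + a_trace < n + 1:
--                     dp[i+1][a + a_trace][b] = min(dp[i+1][a + a_trace][b], dp[i][a][b] + a_trace)
--
--                 # B도둑이 훔치는 경우
--                 if b + b_trace < m + 1:
--                     dp[i+1][a][b + b_trace] = min(dp[i+1][a][b + b_trace], dp[i][a][b])
--     # 정답 찾기
--     result = INF
--     for a in range(n):
--         for b in range(m):
--             result = min(result, dp[len(info)][a][b])
--     return result if result != INF else -1
-- ===== SOURCE B (Python) =====
-- def solution(info, n, m):
--     # 1-D DP over the B-thief's trace total: dp[j] = minimal A-trace total
--     # over splits of the processed prefix whose B-trace total is exactly j,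
--     # keeping only states whose A-trace total already fits under n.
--     if n <= 0 or m <= 0:
--         return -1
--     dp = [None] * m
--     dp[0] = 0
--     for a, b in info:
--         new = [None] * m
--         for j, v in enumerate(dp):
--             if v is None:
--                 continue
--             if v + a <= n - 1 and (new[j] is None or v + a < new[j]):
--                 new[j] = v + a
--             jb = j + b
--             if jb <= m - 1 and (new[jb] is None or v < new[jb]):
--                 new[jb] = v
--         dp = new
--     best = None
--     for v in dp:
--         if v is not None and (best is None or v < best):
--             best = v
--     return best if best is not None else -1
-- ===== Notes on version B (the rewrite author's own statement) =====
-- stated objective: faster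
-- what changed: Replaces the 3-D table dp[item][a_total][b_total] of reachability values by a single rolling 1-D array indexed by the B-thief's trace total that stores the minimal A-trace total, dropping the a-dimension entirely.
-- outside the precondition, e.g. on solution([(-1, 1)], 2, 2): A returns 0, B returns -1
import Mathlib
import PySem

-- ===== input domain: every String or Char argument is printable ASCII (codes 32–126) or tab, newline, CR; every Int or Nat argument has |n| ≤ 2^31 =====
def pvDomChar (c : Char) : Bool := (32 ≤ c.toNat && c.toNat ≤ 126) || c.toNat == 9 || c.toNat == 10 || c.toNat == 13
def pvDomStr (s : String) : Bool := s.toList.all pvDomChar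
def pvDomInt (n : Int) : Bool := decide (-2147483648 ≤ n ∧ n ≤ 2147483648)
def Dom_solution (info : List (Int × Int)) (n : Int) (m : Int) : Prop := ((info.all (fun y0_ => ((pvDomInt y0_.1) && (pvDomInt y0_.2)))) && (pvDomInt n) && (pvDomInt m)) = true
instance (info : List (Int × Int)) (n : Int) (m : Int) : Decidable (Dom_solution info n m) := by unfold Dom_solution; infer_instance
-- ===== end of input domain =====

-- B replaces A's 3-D table dp[item][a_total][b_total] by a 1-D rolling array over the
-- B-thief's trace total that stores the minimal A-trace total (objective: faster,
-- O(len*m) instead of O(len*n*m)); equality is proved on Pre_ (n, m ≥ 0, traces ≥ 0).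



-- ===== PORT A =====
-- Python's float('inf') table entries are modelled as `Option Int` (`none` = INF);
-- `min(cell, v)` with a possibly-INF cell is `optMin`.
def optMin (cur : Option Int) (v : Int) : Option Int :=
  match cur with
  | none => some v
  | some c => some (min c v)

-- dp[i][a][b] read / write for the 3-D list (indices are the loop counters, always ≥ 0)
def get3 (dp : List (List (List (Option Int)))) (i a b : Nat) : Option Int :=
  ((dp.getD i []).getD a []).getD b none

def set3 (dp : List (List (List (Option Int)))) (i a b : Nat) (v : Option Int) :
    List (List (List (Option Int))) :=
  dp.set i ((dp.getD i []).set a (((dp.getD i []).getD a []).set b v))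

-- literal port of A: full 3-D table, i/a/b loops in the same order, `continue` on INF,
-- the two conditional min-writes, then the final a<n, b<m scan.
-- `.toNat` on `a + a_trace` / `b + b_trace` is exact on Pre_ (traces ≥ 0, a,b ≥ 0).
def solution (info : List (Int × Int)) (n : Int) (m : Int) : Int :=
  let k := info.length
  let dp0 : List (List (List (Option Int))) :=
    List.replicate (k+1) (List.replicate (n+1).toNat (List.replicate (m+1).toNat (none : Option Int)))
  let dp1 := set3 dp0 0 0 0 (some 0)
  let dpF := (List.range k).foldl (fun dp i =>
    let p := info.getD i (0, 0)
    (List.range (n+1).toNat).foldl (fun dp a =>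
      (List.range (m+1).toNat).foldl (fun dp b =>
        match get3 dp i a b with
        | none => dp
        | some v =>
          let dp :=
            if (a : Int) + p.1 < n + 1 then
              set3 dp (i+1) ((a : Int) + p.1).toNat b
                (optMin (get3 dp (i+1) ((a : Int) + p.1).toNat b) (v + p.1))
            else dp
          if (b : Int) + p.2 < m + 1 then
            set3 dp (i+1) a ((b : Int) + p.2).toNat
              (optMin (get3 dp (i+1) a ((b : Int) + p.2).toNat) v)
          else dp) dp) dp) dp1
  let result := (List.range n.toNat).foldl (fun r a =>
    (List.range m.toNat).foldl (fun r b =>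
      match r, get3 dpF k a b with
      | none, o => o
      | some c, none => some c
      | some c, some v => some (min c v)) r) none
  match result with
  | some r => r
  | none => -1

-- ===== PORT B =====
-- literal port of B (Source B): 1-D rolling array over the B-trace total, `None` = Option.none.
-- `.toNat` on the enumerate index / `j + b` is exact on Pre_ (indices and traces ≥ 0).
def solution_alt (info : List (Int × Int)) (n : Int) (m : Int) : Int :=
  if n ≤ 0 ∨ m ≤ 0 then -1
  else
    let dp0 : List (Option Int) := (List.replicate m.toNat (none : Option Int)).set 0 (some 0)
    let dpF := info.foldl (fun dp p =>
      (PySem.List.enumerate dp).foldl (fun new jv =>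
        match jv.2 with
        | none => new
        | some v =>
          let new :=
            if v + p.1 ≤ n - 1 &&
                (match new.getD jv.1.toNat none with
                 | none => true
                 | some c => decide (v + p.1 < c)) then
              new.set jv.1.toNat (some (v + p.1))
            else new
          let jb := jv.1 + p.2
          if jb ≤ m - 1 &&
              (match new.getD jb.toNat none with
               | none => true
               | some c => decide (v < c)) then
            new.set jb.toNat (some v)
          else new) (List.replicate m.toNat (none : Option Int))) dp0
    let best := dpF.foldl (fun best v =>
      match v with
      | none => best
      | some v =>
        match best with
        | none => some v
        | some b => if v < b then some v else some b) (none : Option Int)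
    match best with
    | some b => b
    | none => -1

-- ===== PRECONDITION & SPEC =====
-- Pre_ restricts to the puzzle's natural domain: n, m ≥ 0 and non-negative traces.
-- A raises IndexError when n < 0 or m < 0; on negative traces A's negative list indices
-- wrap around Python-style, an accident of the implementation, so those inputs are excluded.
def Pre_solution (info : List (Int × Int)) (n : Int) (m : Int) : Prop :=
  0 ≤ n ∧ 0 ≤ m ∧ ∀ p ∈ info, 0 ≤ p.1 ∧ 0 ≤ p.2
instance (info : List (Int × Int)) (n : Int) (m : Int) : Decidable (Pre_solution info n m) := by
  unfold Pre_solution; infer_instance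
def pvWitness_solution : (List (Int × Int)) × Int × Int := ([(1, 2), (2, 3), (2, 1)], 4, 4)

def Spec_solution (info : List (Int × Int)) (n : Int) (m : Int) (out : Int) : Prop := out = solution_alt info n m
instance (info : List (Int × Int)) (n : Int) (m : Int) (out : Int) : Decidable (Spec_solution info n m out) := by unfold Spec_solution; infer_instance

-- ===== CLAIM (what is proved, stated in full; the proofs are below) =====
def Claim_equal_solution : Prop := ∀ (info : List (Int × Int)) (n : Int) (m : Int), Dom_solution info n m → Pre_solution info n m → Spec_solution info n m (solution info n m)

-- ===== LEMMAS AND PROOFS =====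

/- Option-valued minimum (none = +infinity), the combining operation of both DPs. -/
def omin2 : Option Int → Option Int → Option Int
  | none, o => o
  | some c, none => some c
  | some c, some v => some (min c v)

lemma omin2_none_right (o : Option Int) : omin2 o none = o := by cases o <;> rfl

lemma optMin_eq_omin2 (o : Option Int) (v : Int) : optMin o v = omin2 o (some v) := by
  cases o <;> rfl

lemma omin2_ne_none (o₁ o₂ : Option Int) : omin2 o₁ o₂ ≠ none ↔ o₁ ≠ none ∨ o₂ ≠ none := by
  cases o₁ <;> cases o₂ <;> simp [omin2]

/- minimum of a decidable predicate over ℕ below a bound -/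
def minOpt (P : Nat → Prop) [DecidablePred P] (B : Nat) : Option Nat :=
  ((List.range B).filter (fun a => decide (P a))).head?

lemma minOpt_zero (P : Nat → Prop) [DecidablePred P] : minOpt P 0 = none := rfl

lemma minOpt_succ (P : Nat → Prop) [DecidablePred P] (B : Nat) :
    minOpt P (B + 1) =
      (match minOpt P B with
       | some v => some v
       | none => if P B then some B else none) := by
  unfold minOpt
  rw [List.range_succ, List.filter_append, List.head?_append]
  cases h : ((List.range B).filter (fun a => decide (P a))).head? <;>
    by_cases hP : P B <;> simp [List.filter, hP]

lemma minOpt_eq_none_iff {P : Nat → Prop} [DecidablePred P] {B : Nat} :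
    minOpt P B = none ↔ ∀ a < B, ¬ P a := by
  unfold minOpt
  rw [List.head?_eq_none_iff, List.filter_eq_nil_iff]
  simp

lemma minOpt_eq_some_iff {P : Nat → Prop} [DecidablePred P] {B a : Nat} :
    minOpt P B = some a ↔ (a < B ∧ P a) ∧ ∀ b < a, ¬ P b := by
  induction B generalizing a with
  | zero => simp [minOpt_zero]
  | succ B ih =>
      rw [minOpt_succ]
      cases h : minOpt P B with
      | some v =>
          rw [ih] at h
          simp only [Option.some_inj]
          constructor
          · rintro rfl
            exact ⟨⟨Nat.lt_succ_of_lt h.1.1, h.1.2⟩, h.2⟩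
          · rintro ⟨⟨ha, hPa⟩, hmin⟩
            by_contra hne
            rcases Nat.lt_or_ge v a with hlt | hge
            · exact hmin v hlt h.1.2
            · exact h.2 a (Nat.lt_of_le_of_ne hge (fun he => hne he.symm)) hPa
      | none =>
          rw [minOpt_eq_none_iff] at h
          by_cases hP : P B <;> simp only [hP, if_true, if_false]
          · simp only [Option.some_inj]
            constructor
            · rintro rfl
              exact ⟨⟨Nat.lt_succ_self _, hP⟩, fun b hb => h b hb⟩
            · rintro ⟨⟨ha, hPa⟩, _⟩
              by_contra hne
              exact h a (Nat.lt_of_le_of_ne (Nat.lt_succ_iff.1 ha) (fun he => hne he.symm)) hPa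
          · simp only [reduceCtorEq, false_iff, not_and]
            rintro ⟨ha, hPa⟩
            rcases Nat.lt_succ_iff_lt_or_eq.1 ha with h' | rfl
            · exact absurd hPa (h a h')
            · exact absurd hPa hP

lemma minOpt_congr {P Q : Nat → Prop} [DecidablePred P] [DecidablePred Q] {B : Nat}
    (h : ∀ a, a < B → (P a ↔ Q a)) : minOpt P B = minOpt Q B := by
  cases hq : minOpt Q B with
  | none =>
      rw [minOpt_eq_none_iff] at hq ⊢
      intro a ha hPa; exact hq a ha ((h a ha).1 hPa)
  | some v =>
      rw [minOpt_eq_some_iff] at hq ⊢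
      refine ⟨⟨hq.1.1, (h v hq.1.1).2 hq.1.2⟩, fun b hb hPb => ?_⟩
      exact hq.2 b hb ((h b (Nat.lt_trans hb hq.1.1)).1 hPb)

def ominN : Option Nat → Option Nat → Option Nat
  | none, o => o
  | some c, none => some c
  | some c, some v => some (min c v)

lemma ominN_map_cast (o₁ o₂ : Option Nat) :
    omin2 (o₁.map (fun a : Nat => (a : Int))) (o₂.map (fun a : Nat => (a : Int))) =
      (ominN o₁ o₂).map (fun a : Nat => (a : Int)) := by
  cases o₁ <;> cases o₂ <;> simp [omin2, ominN]

lemma minOpt_or {P Q : Nat → Prop} [DecidablePred P] [DecidablePred Q] {B : Nat} :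
    minOpt (fun a => P a ∨ Q a) B = ominN (minOpt P B) (minOpt Q B) := by
  cases hp : minOpt P B with
  | none =>
      cases hq : minOpt Q B with
      | none =>
          simp only [ominN]
          rw [minOpt_eq_none_iff] at hp hq ⊢
          rintro a ha (h | h)
          · exact hp a ha h
          · exact hq a ha h
      | some w =>
          simp only [ominN]
          rw [minOpt_eq_none_iff] at hp
          rw [minOpt_eq_some_iff] at hq ⊢
          exact ⟨⟨hq.1.1, Or.inr hq.1.2⟩, fun b hb h => by
            rcases h with h | h
            · exact hp b (Nat.lt_trans hb hq.1.1) h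
            · exact hq.2 b hb h⟩
  | some v =>
      rw [minOpt_eq_some_iff] at hp
      cases hq : minOpt Q B with
      | none =>
          simp only [ominN]
          rw [minOpt_eq_none_iff] at hq
          rw [minOpt_eq_some_iff]
          exact ⟨⟨hp.1.1, Or.inl hp.1.2⟩, fun b hb h => by
            rcases h with h | h
            · exact hp.2 b hb h
            · exact hq b (Nat.lt_trans hb hp.1.1) h⟩
      | some w =>
          rw [minOpt_eq_some_iff] at hq
          simp only [ominN]
          rw [minOpt_eq_some_iff]
          rcases Nat.le_total v w with hvw | hwv
          · rw [Nat.min_eq_left hvw]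
            exact ⟨⟨hp.1.1, Or.inl hp.1.2⟩, fun b hb h => by
              rcases h with h | h
              · exact hp.2 b hb h
              · exact hq.2 b (Nat.lt_of_lt_of_le hb hvw) h⟩
          · rw [Nat.min_eq_right hwv]
            exact ⟨⟨hq.1.1, Or.inr hq.1.2⟩, fun b hb h => by
              rcases h with h | h
              · exact hp.2 b (Nat.lt_of_lt_of_le hb hwv) h
              · exact hq.2 b hb h⟩

/- shift lemma: minimum of the image under (· + s) truncated below the bound -/
lemma minOpt_shift {R : Nat → Prop} [DecidablePred R] (s B : Nat) :
    minOpt (fun a => s ≤ a ∧ R (a - s)) B =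
      (match minOpt R B with
       | some v => if v + s < B then some (v + s) else none
       | none => none) := by
  cases hr : minOpt R B with
  | none =>
      rw [minOpt_eq_none_iff] at hr
      simp only []
      rw [minOpt_eq_none_iff]
      rintro a ha ⟨hs, hR⟩
      exact hr (a - s) (Nat.lt_of_le_of_lt (Nat.sub_le a s) ha) hR
  | some v =>
      rw [minOpt_eq_some_iff] at hr
      simp only []
      by_cases hvs : v + s < B
      · rw [if_pos hvs, minOpt_eq_some_iff]
        refine ⟨⟨hvs, Nat.le_add_left s v, by simpa using hr.1.2⟩, ?_⟩
        rintro b hb ⟨hsb, hRb⟩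
        have : b - s < v := by omega
        exact hr.2 (b - s) this hRb
      · rw [if_neg hvs, minOpt_eq_none_iff]
        rintro a ha ⟨hsa, hRa⟩
        have hva : v ≤ a - s := by
          by_contra hlt
          exact hr.2 (a - s) (Nat.lt_of_not_le hlt) hRa
        omega

/- ===== abstract layers of A's DP ===== -/
def stepL (nn mm : Nat) (p : Int × Int) (L : Nat → Nat → Option Int) : Nat → Nat → Option Int :=
  fun x y =>
    omin2 (if p.1.toNat ≤ x ∧ x ≤ nn ∧ y ≤ mm then (L (x - p.1.toNat) y).map (· + p.1) else none)
          (if p.2.toNat ≤ y ∧ y ≤ mm ∧ x ≤ nn then L x (y - p.2.toNat) else none)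

def L0 : Nat → Nat → Option Int := fun a b => if a = 0 ∧ b = 0 then some (0 : Int) else none

def Lt (nn mm : Nat) (pre : List (Int × Int)) : Nat → Nat → Option Int :=
  pre.foldl (fun L p => stepL nn mm p L) L0

lemma Lt_append (nn mm : Nat) (pre : List (Int × Int)) (p : Int × Int) :
    Lt nn mm (pre ++ [p]) = stepL nn mm p (Lt nn mm pre) := by
  simp [Lt, List.foldl_append]

/- every finite layer value equals its own a-index -/
lemma Lt_val (nn mm : Nat) (pre : List (Int × Int)) (hpre : ∀ q ∈ pre, 0 ≤ q.1 ∧ 0 ≤ q.2) :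
    ∀ a b v, Lt nn mm pre a b = some v → v = (a : Int) := by
  induction pre using List.reverseRecOn with
  | nil =>
      intro a b v h
      simp only [Lt, List.foldl_nil, L0] at h
      split at h
      · rename_i hc
        cases h
        omega
      · cases h
  | append_singleton pre p ih =>
      have hp := hpre p (by simp)
      have hpre' : ∀ q ∈ pre, 0 ≤ q.1 ∧ 0 ≤ q.2 := fun q hq => hpre q (by simp [hq])
      intro a b v h
      rw [Lt_append] at h
      unfold stepL at h
      by_cases hG1 : p.1.toNat ≤ a ∧ a ≤ nn ∧ b ≤ mm
      · rw [if_pos hG1] at h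
        by_cases hG2 : p.2.toNat ≤ b ∧ b ≤ mm ∧ a ≤ nn
        · rw [if_pos hG2] at h
          cases o1 : Lt nn mm pre (a - p.1.toNat) b with
          | none =>
              rw [o1] at h
              cases o2 : Lt nn mm pre a (b - p.2.toNat) with
              | none => rw [o2] at h; cases h
              | some u2 =>
                  rw [o2] at h
                  simp only [Option.map_none, omin2, Option.some_inj] at h
                  rw [← h]
                  exact ih hpre' a _ u2 o2
          | some u1 =>
              have hu1 : u1 = ((a - p.1.toNat : Nat) : Int) := ih hpre' _ b u1 o1
              rw [o1] at h
              cases o2 : Lt nn mm pre a (b - p.2.toNat) with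
              | none =>
                  rw [o2] at h
                  simp only [Option.map_some, omin2, Option.some_inj] at h
                  omega
              | some u2 =>
                  have hu2 : u2 = (a : Int) := ih hpre' a _ u2 o2
                  rw [o2] at h
                  simp only [Option.map_some, omin2, Option.some_inj] at h
                  omega
        · rw [if_neg hG2] at h
          cases o1 : Lt nn mm pre (a - p.1.toNat) b with
          | none => rw [o1] at h; cases h
          | some u1 =>
              have hu1 : u1 = ((a - p.1.toNat : Nat) : Int) := ih hpre' _ b u1 o1
              rw [o1] at h
              simp only [Option.map_some, omin2, Option.some_inj] at h
              omega
      · rw [if_neg hG1] at h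
        by_cases hG2 : p.2.toNat ≤ b ∧ b ≤ mm ∧ a ≤ nn
        · rw [if_pos hG2] at h
          cases o2 : Lt nn mm pre a (b - p.2.toNat) with
          | none => rw [o2] at h; cases h
          | some u2 =>
              rw [o2] at h
              simp only [omin2, Option.some_inj] at h
              rw [← h]
              exact ih hpre' a _ u2 o2
        · rw [if_neg hG2] at h
          cases h

/- getD/set helpers -/
lemma getD_set_self {α : Type} (l : List α) (i : Nat) (x d : α) (h : i < l.length) :
    (l.set i x).getD i d = x := by
  simp [List.getD_eq_getElem?_getD, List.getElem?_set_self, h]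

lemma getD_set_ne {α : Type} (l : List α) (i j : Nat) (x d : α) (h : j ≠ i) :
    (l.set i x).getD j d = l.getD j d := by
  simp [List.getD_eq_getElem?_getD, List.getElem?_set_ne (fun he => h he.symm)]

lemma getD_mem {α : Type} (l : List α) (i : Nat) (d : α) (h : i < l.length) :
    l.getD i d ∈ l := by
  rw [List.getD_eq_getElem?_getD]
  simp only [List.getElem?_eq_getElem h, Option.getD_some]
  exact List.getElem_mem h

/- ===== shape of A's 3-D table and get/set lemmas ===== -/
def Shape (k nn mm : Nat) (dp : List (List (List (Option Int)))) : Prop :=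
  dp.length = k + 1 ∧ ∀ l ∈ dp, l.length = nn + 1 ∧ ∀ r ∈ l, r.length = mm + 1

lemma Shape_set3 (k nn mm : Nat) (dp : List (List (List (Option Int)))) (i a b : Nat)
    (v : Option Int) (h : Shape k nn mm dp) (hi : i ≤ k) (ha : a ≤ nn) (hb : b ≤ mm) :
    Shape k nn mm (set3 dp i a b v) := by
  obtain ⟨hlen, hmem⟩ := h
  have hi' : i < dp.length := by omega
  have hlayer : dp.getD i [] ∈ dp := getD_mem _ _ _ hi'
  obtain ⟨hllen, hrows⟩ := hmem _ hlayer
  have ha' : a < (dp.getD i []).length := by omega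
  have hrow : (dp.getD i []).getD a [] ∈ dp.getD i [] := getD_mem _ _ _ ha'
  constructor
  · rw [set3, List.length_set]; exact hlen
  · intro l hl
    rcases List.mem_or_eq_of_mem_set hl with hl | rfl
    · exact hmem l hl
    · constructor
      · rw [List.length_set]; exact hllen
      · intro r hr
        rcases List.mem_or_eq_of_mem_set hr with hr | rfl
        · exact hrows r hr
        · rw [List.length_set]; exact hrows _ hrow

lemma get3_set3_same (k nn mm : Nat) (dp : List (List (List (Option Int)))) (i a b : Nat)
    (v : Option Int) (h : Shape k nn mm dp) (hi : i ≤ k) (ha : a ≤ nn) (hb : b ≤ mm) :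
    get3 (set3 dp i a b v) i a b = v := by
  obtain ⟨hlen, hmem⟩ := h
  have hi' : i < dp.length := by omega
  have hlayer : dp.getD i [] ∈ dp := getD_mem _ _ _ hi'
  obtain ⟨hllen, hrows⟩ := hmem _ hlayer
  have ha' : a < (dp.getD i []).length := by omega
  have hrow : (dp.getD i []).getD a [] ∈ dp.getD i [] := getD_mem _ _ _ ha'
  have hb' : b < ((dp.getD i []).getD a []).length := by
    have := hrows _ hrow; omega
  unfold get3 set3
  rw [getD_set_self _ _ _ _ hi', getD_set_self _ _ _ _ ha', getD_set_self _ _ _ _ hb']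

lemma get3_set3_ne (dp : List (List (List (Option Int)))) (i a b i' a' b' : Nat)
    (v : Option Int) (h : ¬ (i' = i ∧ a' = a ∧ b' = b)) :
    get3 (set3 dp i a b v) i' a' b' = get3 dp i' a' b' := by
  unfold get3 set3
  by_cases hi : i' = i
  · subst hi
    by_cases hlen : i' < dp.length
    · rw [getD_set_self _ _ _ _ hlen]
      by_cases ha : a' = a
      · subst ha
        have hb : b' ≠ b := fun hb => h ⟨rfl, rfl, hb⟩
        by_cases hlen2 : a' < (dp.getD i' []).length
        · rw [getD_set_self _ _ _ _ hlen2, getD_set_ne _ _ _ _ _ hb]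
        · rw [List.set_eq_of_length_le (Nat.le_of_not_lt hlen2)]
      · rw [getD_set_ne _ _ _ _ _ ha]
    · rw [List.set_eq_of_length_le (Nat.le_of_not_lt hlen)]
  · rw [getD_set_ne _ _ _ _ _ hi]

/- ===== one iteration of A's i-loop ===== -/
def contrib (nn mm : Nat) (p : Int × Int) (L : Nat → Nat → Option Int)
    (done : List (Nat × Nat)) (x y : Nat) : Option Int :=
  omin2 (if p.1.toNat ≤ x ∧ x ≤ nn ∧ y ≤ mm ∧ (x - p.1.toNat, y) ∈ done then
           (L (x - p.1.toNat) y).map (· + p.1) else none)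
        (if p.2.toNat ≤ y ∧ y ≤ mm ∧ x ≤ nn ∧ (x, y - p.2.toNat) ∈ done then
           L x (y - p.2.toNat) else none)

lemma contrib_nil (nn mm : Nat) (p : Int × Int) (L : Nat → Nat → Option Int) (x y : Nat) :
    contrib nn mm p L [] x y = none := by
  simp [contrib, omin2]

/- appending a processed pair whose source cell is empty changes nothing -/
lemma contrib_append_none (nn mm : Nat) (p : Int × Int) (L : Nat → Nat → Option Int)
    (done : List (Nat × Nat)) (α β : Nat) (hv : L α β = none) (x y : Nat) :
    contrib nn mm p L (done ++ [(α, β)]) x y = contrib nn mm p L done x y := by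
  unfold contrib
  congr 1
  · by_cases hpair : x - p.1.toNat = α ∧ y = β
    · by_cases hG : p.1.toNat ≤ x ∧ x ≤ nn ∧ y ≤ mm
      · have hsrc : (x - p.1.toNat, y) = (α, β) := by rw [hpair.1, hpair.2]
        rw [hpair.1, hpair.2, hv]
        simp
      · rw [if_neg (fun h => hG ⟨h.1, h.2.1, h.2.2.1⟩),
          if_neg (fun h => hG ⟨h.1, h.2.1, h.2.2.1⟩)]
    · have : ((x - p.1.toNat, y) ∈ done ++ [(α, β)]) ↔ ((x - p.1.toNat, y) ∈ done) := by
        simp only [List.mem_append, List.mem_singleton, Prod.mk.injEq]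
        constructor
        · rintro (h | h)
          · exact h
          · exact absurd h hpair
        · exact Or.inl
      simp only [this]
  · by_cases hpair : x = α ∧ y - p.2.toNat = β
    · by_cases hG : p.2.toNat ≤ y ∧ y ≤ mm ∧ x ≤ nn
      · rw [hpair.1, hpair.2, hv]
        simp
      · rw [if_neg (fun h => hG ⟨h.1, h.2.1, h.2.2.1⟩),
          if_neg (fun h => hG ⟨h.1, h.2.1, h.2.2.1⟩)]
    · have : ((x, y - p.2.toNat) ∈ done ++ [(α, β)]) ↔ ((x, y - p.2.toNat) ∈ done) := by
        simp only [List.mem_append, List.mem_singleton, Prod.mk.injEq]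
        constructor
        · rintro (h | h)
          · exact h
          · exact absurd h hpair
        · exact Or.inl
      simp only [this]

lemma omin2_writes (A B : Option Int) (fA fB : Prop) [Decidable fA] [Decidable fB]
    (wA wB : Int) :
    omin2 (if fA then omin2 A (some wA) else A) (if fB then omin2 B (some wB) else B) =
      (let c1 := omin2 A B
       let c2 := if fA then omin2 c1 (some wA) else c1
       if fB then omin2 c2 (some wB) else c2) := by
  by_cases hA : fA <;> by_cases hB : fB <;>
    simp only [hA, hB, ite_true, ite_false, if_pos, if_neg, not_false_iff] <;>
    cases A <;> cases B <;>
    simp [omin2, min_assoc, min_comm, min_left_comm]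

/- appending a processed pair with value v: the two (conditional) min-writes -/
lemma contrib_append_some (nn mm : Nat) (p : Int × Int) (L : Nat → Nat → Option Int)
    (done : List (Nat × Nat)) (α β : Nat) (v : Int) (hv : L α β = some v)
    (hnotin : (α, β) ∉ done) (hα : α ≤ nn) (hβ : β ≤ mm) (x y : Nat) :
    contrib nn mm p L (done ++ [(α, β)]) x y =
      (let c1 := contrib nn mm p L done x y
       let c2 := if x = α + p.1.toNat ∧ y = β ∧ α + p.1.toNat ≤ nn then
                   omin2 c1 (some (v + p.1)) else c1
       if x = α ∧ y = β + p.2.toNat ∧ β + p.2.toNat ≤ mm then omin2 c2 (some v) else c2) := by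
  have memA : ∀ (z : Nat × Nat), z ∈ done ++ [(α, β)] ↔ (z ∈ done ∨ z = (α, β)) := by
    intro z; simp [List.mem_append]
  -- characterize the two parts
  have hApart :
      (if p.1.toNat ≤ x ∧ x ≤ nn ∧ y ≤ mm ∧ (x - p.1.toNat, y) ∈ done ++ [(α, β)] then
         (L (x - p.1.toNat) y).map (· + p.1) else none) =
      (if x = α + p.1.toNat ∧ y = β ∧ α + p.1.toNat ≤ nn then
         omin2 (if p.1.toNat ≤ x ∧ x ≤ nn ∧ y ≤ mm ∧ (x - p.1.toNat, y) ∈ done then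
                  (L (x - p.1.toNat) y).map (· + p.1) else none) (some (v + p.1))
       else
         (if p.1.toNat ≤ x ∧ x ≤ nn ∧ y ≤ mm ∧ (x - p.1.toNat, y) ∈ done then
            (L (x - p.1.toNat) y).map (· + p.1) else none)) := by
    by_cases hflag : x = α + p.1.toNat ∧ y = β ∧ α + p.1.toNat ≤ nn
    · obtain ⟨hx, hy, hcap⟩ := hflag
      subst hx; subst hy
      have hsub : α + p.1.toNat - p.1.toNat = α := by omega
      rw [if_pos ⟨Nat.le_add_left _ _, hcap, hβ, by rw [hsub]; exact (memA _).2 (Or.inr rfl)⟩]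
      rw [if_pos ⟨rfl, rfl, hcap⟩, if_neg (fun h => hnotin (by rw [hsub] at h; exact h.2.2.2))]
      rw [hsub, hv]
      simp [omin2]
    · rw [if_neg hflag]
      by_cases hmem : (x - p.1.toNat, y) ∈ done
      · have : (x - p.1.toNat, y) ∈ done ++ [(α, β)] := (memA _).2 (Or.inl hmem)
        by_cases hG : p.1.toNat ≤ x ∧ x ≤ nn ∧ y ≤ mm
        · rw [if_pos ⟨hG.1, hG.2.1, hG.2.2, this⟩, if_pos ⟨hG.1, hG.2.1, hG.2.2, hmem⟩]
        · rw [if_neg (fun h => hG ⟨h.1, h.2.1, h.2.2.1⟩),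
            if_neg (fun h => hG ⟨h.1, h.2.1, h.2.2.1⟩)]
      · by_cases hG : p.1.toNat ≤ x ∧ x ≤ nn ∧ y ≤ mm
        · by_cases hnew : (x - p.1.toNat, y) = (α, β)
          · exfalso
            apply hflag
            have h1 : x - p.1.toNat = α := (Prod.mk.injEq _ _ _ _ ▸ hnew).1
            have h2 : y = β := (Prod.mk.injEq _ _ _ _ ▸ hnew).2
            exact ⟨by omega, h2, by omega⟩
          · rw [if_neg (fun h => hmem (((memA _).1 h.2.2.2).resolve_right hnew)),
              if_neg (fun h => hmem h.2.2.2)]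
        · rw [if_neg (fun h => hG ⟨h.1, h.2.1, h.2.2.1⟩),
            if_neg (fun h => hG ⟨h.1, h.2.1, h.2.2.1⟩)]
  have hBpart :
      (if p.2.toNat ≤ y ∧ y ≤ mm ∧ x ≤ nn ∧ (x, y - p.2.toNat) ∈ done ++ [(α, β)] then
         L x (y - p.2.toNat) else none) =
      (if x = α ∧ y = β + p.2.toNat ∧ β + p.2.toNat ≤ mm then
         omin2 (if p.2.toNat ≤ y ∧ y ≤ mm ∧ x ≤ nn ∧ (x, y - p.2.toNat) ∈ done then
                  L x (y - p.2.toNat) else none) (some v)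
       else
         (if p.2.toNat ≤ y ∧ y ≤ mm ∧ x ≤ nn ∧ (x, y - p.2.toNat) ∈ done then
            L x (y - p.2.toNat) else none)) := by
    by_cases hflag : x = α ∧ y = β + p.2.toNat ∧ β + p.2.toNat ≤ mm
    · obtain ⟨hx, hy, hcap⟩ := hflag
      subst hx; subst hy
      have hsub : β + p.2.toNat - p.2.toNat = β := by omega
      rw [if_pos ⟨Nat.le_add_left _ _, hcap, hα, by rw [hsub]; exact (memA _).2 (Or.inr rfl)⟩]
      rw [if_pos ⟨rfl, rfl, hcap⟩, if_neg (fun h => hnotin (by rw [hsub] at h; exact h.2.2.2))]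
      rw [hsub, hv]
      simp [omin2]
    · rw [if_neg hflag]
      by_cases hmem : (x, y - p.2.toNat) ∈ done
      · have : (x, y - p.2.toNat) ∈ done ++ [(α, β)] := (memA _).2 (Or.inl hmem)
        by_cases hG : p.2.toNat ≤ y ∧ y ≤ mm ∧ x ≤ nn
        · rw [if_pos ⟨hG.1, hG.2.1, hG.2.2, this⟩, if_pos ⟨hG.1, hG.2.1, hG.2.2, hmem⟩]
        · rw [if_neg (fun h => hG ⟨h.1, h.2.1, h.2.2.1⟩),
            if_neg (fun h => hG ⟨h.1, h.2.1, h.2.2.1⟩)]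
      · by_cases hG : p.2.toNat ≤ y ∧ y ≤ mm ∧ x ≤ nn
        · by_cases hnew : (x, y - p.2.toNat) = (α, β)
          · exfalso
            apply hflag
            have h1 : x = α := (Prod.mk.injEq _ _ _ _ ▸ hnew).1
            have h2 : y - p.2.toNat = β := (Prod.mk.injEq _ _ _ _ ▸ hnew).2
            exact ⟨h1, by omega, by omega⟩
          · rw [if_neg (fun h => hmem (((memA _).1 h.2.2.2).resolve_right hnew)),
              if_neg (fun h => hmem h.2.2.2)]
        · rw [if_neg (fun h => hG ⟨h.1, h.2.1, h.2.2.1⟩),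
            if_neg (fun h => hG ⟨h.1, h.2.1, h.2.2.1⟩)]
  show omin2 _ _ = _
  rw [hApart, hBpart]
  exact omin2_writes _ _ _ _ _ _

/- generic prefix-invariant induction over a foldl -/
lemma foldl_prefix_inv {σ τ : Type} (f : σ → τ → σ) (ps : List τ) (Inv : List τ → σ → Prop)
    (hstep : ∀ done q rest, ps = done ++ q :: rest → ∀ s, Inv done s → Inv (done ++ [q]) (f s q)) :
    ∀ rest done s, ps = done ++ rest → Inv done s → Inv ps (rest.foldl f s) := by
  intro rest
  induction rest with
  | nil =>
      intro done s h hI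
      rw [List.foldl_nil, h, List.append_nil]
      exact hI
  | cons q rest ih =>
      intro done s h hI
      rw [List.foldl_cons]
      exact ih (done ++ [q]) (f s q) (by rw [h, List.append_assoc]; rfl)
        (hstep done q rest h s hI)

/- nested fold over two ranges = fold over the product list -/
lemma foldl_foldl_product {σ : Type} (f : σ → Nat → Nat → σ) (la lb : List Nat) (init : σ) :
    la.foldl (fun s a => lb.foldl (fun s b => f s a b) s) init
      = (la.flatMap (fun a => lb.map (fun b => (a, b)))).foldl (fun s q => f s q.1 q.2) init := by
  induction la generalizing init with
  | nil => rfl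
  | cons a la ih =>
      rw [List.foldl_cons, List.flatMap_cons, List.foldl_append, List.foldl_map]
      exact ih _

lemma nodup_pairs (A B : Nat) :
    ((List.range A).flatMap (fun a => (List.range B).map (fun b => (a, b)))).Nodup := by
  rw [List.nodup_flatMap]
  constructor
  · exact fun a _ => (List.nodup_range).map (fun b b' h => (Prod.mk.injEq _ _ _ _ ▸ h).2)
  · have : ∀ a a' : Nat, a ≠ a' →
        List.Disjoint ((List.range B).map (fun b => (a, b)))
          ((List.range B).map (fun b => (a', b))) := by
      intro a a' hne q hq hq'
      rcases List.mem_map.mp hq with ⟨b, _, rfl⟩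
      rcases List.mem_map.mp hq' with ⟨b', _, hba⟩
      exact hne (Prod.mk.injEq _ _ _ _ ▸ hba.symm).1
    exact List.Pairwise.imp_of_mem (fun {a a'} _ _ h => this a a' h)
      (List.nodup_range.imp (fun h => h))

lemma mem_pairs {A B : Nat} {q : Nat × Nat} :
    q ∈ ((List.range A).flatMap (fun a => (List.range B).map (fun b => (a, b)))) ↔
      q.1 < A ∧ q.2 < B := by
  constructor
  · intro h
    rcases List.mem_flatMap.mp h with ⟨a, ha, hq⟩
    rcases List.mem_map.mp hq with ⟨b, hb, rfl⟩
    exact ⟨List.mem_range.mp ha, List.mem_range.mp hb⟩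
  · rintro ⟨h1, h2⟩
    exact List.mem_flatMap.mpr ⟨q.1, List.mem_range.mpr h1,
      List.mem_map.mpr ⟨q.2, List.mem_range.mpr h2, rfl⟩⟩

/- on the full pair list, contrib is exactly stepL -/
lemma contrib_full (nn mm : Nat) (p : Int × Int) (L : Nat → Nat → Option Int) (x y : Nat) :
    contrib nn mm p L
        ((List.range (nn+1)).flatMap (fun a => (List.range (mm+1)).map (fun b => (a, b)))) x y
      = stepL nn mm p L x y := by
  unfold contrib stepL
  congr 1
  · by_cases hG : p.1.toNat ≤ x ∧ x ≤ nn ∧ y ≤ mm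
    · rw [if_pos hG, if_pos ⟨hG.1, hG.2.1, hG.2.2,
        mem_pairs.mpr ⟨by omega, by omega⟩⟩]
    · rw [if_neg (fun h => hG ⟨h.1, h.2.1, h.2.2.1⟩), if_neg hG]
  · by_cases hG : p.2.toNat ≤ y ∧ y ≤ mm ∧ x ≤ nn
    · rw [if_pos hG, if_pos ⟨hG.1, hG.2.1, hG.2.2,
        mem_pairs.mpr ⟨by omega, by omega⟩⟩]
    · rw [if_neg (fun h => hG ⟨h.1, h.2.1, h.2.2.1⟩), if_neg hG]

/- one conditional min-write into layer t+1 -/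
lemma write_one (k nT mT : Nat) (s dp0 : List (List (List (Option Int)))) (t X Y : Nat)
    (w : Int) (g : Nat → Nat → Option Int)
    (HS : Shape k nT mT s) (ht : t + 1 ≤ k) (hX : X ≤ nT) (hY : Y ≤ mT)
    (Hother : ∀ j a b, j ≠ t+1 → get3 s j a b = get3 dp0 j a b)
    (Hlayer : ∀ x y, get3 s (t+1) x y = g x y) :
    Shape k nT mT (set3 s (t+1) X Y (optMin (get3 s (t+1) X Y) w)) ∧
    (∀ j a b, j ≠ t+1 →
      get3 (set3 s (t+1) X Y (optMin (get3 s (t+1) X Y) w)) j a b = get3 dp0 j a b) ∧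
    (∀ x y, get3 (set3 s (t+1) X Y (optMin (get3 s (t+1) X Y) w)) (t+1) x y =
      if x = X ∧ y = Y then omin2 (g x y) (some w) else g x y) := by
  refine ⟨Shape_set3 _ _ _ _ _ _ _ _ HS ht hX hY, ?_, ?_⟩
  · intro j a b hj
    rw [get3_set3_ne _ _ _ _ _ _ _ _ (fun h => hj h.1), Hother j a b hj]
  · intro x y
    by_cases hpair : x = X ∧ y = Y
    · obtain ⟨rfl, rfl⟩ := hpair
      rw [get3_set3_same _ _ _ _ _ _ _ _ HS ht hX hY, if_pos ⟨rfl, rfl⟩,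
        optMin_eq_omin2, Hlayer]
    · rw [get3_set3_ne _ _ _ _ _ _ _ _
        (fun h => hpair ⟨h.2.1, h.2.2⟩), if_neg hpair, Hlayer]

/- one full iteration of A's item loop -/
lemma stepA (k : Nat) (p : Int × Int) (n m : Int) (hn : 0 ≤ n) (hm : 0 ≤ m)
    (hp1 : 0 ≤ p.1) (hp2 : 0 ≤ p.2) (t : Nat) (ht : t + 1 ≤ k)
    (L : Nat → Nat → Option Int) (dp0 : List (List (List (Option Int))))
    (HS : Shape k n.toNat m.toNat dp0)
    (Hread : ∀ a b, get3 dp0 t a b = L a b)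
    (Hnext : ∀ x y, get3 dp0 (t+1) x y = none) :
    ∀ dp', dp' = (List.range (n+1).toNat).foldl (fun dp a =>
        (List.range (m+1).toNat).foldl (fun dp b =>
          match get3 dp t a b with
          | none => dp
          | some v =>
            let dp2 := if (a : Int) + p.1 < n + 1 then
                set3 dp (t+1) ((a : Int) + p.1).toNat b
                  (optMin (get3 dp (t+1) ((a : Int) + p.1).toNat b) (v + p.1))
              else dp
            if (b : Int) + p.2 < m + 1 then
              set3 dp2 (t+1) a ((b : Int) + p.2).toNat
                (optMin (get3 dp2 (t+1) a ((b : Int) + p.2).toNat) v)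
            else dp2) dp) dp0 →
      Shape k n.toNat m.toNat dp' ∧
      (∀ j a b, j ≠ t+1 → get3 dp' j a b = get3 dp0 j a b) ∧
      (∀ x y, get3 dp' (t+1) x y = stepL n.toNat m.toNat p L x y) := by
  intro dp' hdp'
  rw [foldl_foldl_product] at hdp'
  have hnT : (n+1).toNat = n.toNat + 1 := by omega
  have hmT : (m+1).toNat = m.toNat + 1 := by omega
  rw [hnT, hmT] at hdp'
  have main := foldl_prefix_inv
    (f := fun dp (q : Nat × Nat) =>
      match get3 dp t q.1 q.2 with
      | none => dp
      | some v =>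
        let dp2 := if (q.1 : Int) + p.1 < n + 1 then
            set3 dp (t+1) ((q.1 : Int) + p.1).toNat q.2
              (optMin (get3 dp (t+1) ((q.1 : Int) + p.1).toNat q.2) (v + p.1))
          else dp
        if (q.2 : Int) + p.2 < m + 1 then
          set3 dp2 (t+1) q.1 ((q.2 : Int) + p.2).toNat
            (optMin (get3 dp2 (t+1) q.1 ((q.2 : Int) + p.2).toNat) v)
        else dp2)
    (ps := (List.range (n.toNat+1)).flatMap (fun a => (List.range (m.toNat+1)).map (fun b => (a, b))))
    (Inv := fun done dp =>
      Shape k n.toNat m.toNat dp ∧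
      (∀ j a b, j ≠ t+1 → get3 dp j a b = get3 dp0 j a b) ∧
      (∀ x y, get3 dp (t+1) x y = contrib n.toNat m.toNat p L done x y))
    ?_ _ [] dp0 rfl
    ⟨HS, fun _ _ _ _ => rfl, fun x y => by rw [contrib_nil]; exact Hnext x y⟩
  · obtain ⟨S1, S2, S3⟩ := main
    subst hdp'
    exact ⟨S1, S2, fun x y => (S3 x y).trans (contrib_full n.toNat m.toNat p L x y)⟩
  · intro done q rest heq s hI
    beta_reduce
    obtain ⟨S1, S2, S3⟩ := hI
    have hqmem : q.1 < n.toNat + 1 ∧ q.2 < m.toNat + 1 := by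
      refine mem_pairs.mp (heq ▸ ?_)
      simp
    have hαle : q.1 ≤ n.toNat := by omega
    have hβle : q.2 ≤ m.toNat := by omega
    have hnotin : q ∉ done := by
      have hnd : (done ++ q :: rest).Nodup := heq ▸ nodup_pairs _ _
      have hdisj := List.disjoint_of_nodup_append hnd
      exact fun h => hdisj h (List.mem_cons_self)
    have hread : get3 s t q.1 q.2 = L q.1 q.2 := by
      rw [S2 t _ _ (by omega), Hread]
    cases hv : L q.1 q.2 with
    | none =>
        have hbody : (match get3 s t q.1 q.2 with
          | none => s
          | some v =>
            let dp2 := if (q.1 : Int) + p.1 < n + 1 then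
                set3 s (t+1) ((q.1 : Int) + p.1).toNat q.2
                  (optMin (get3 s (t+1) ((q.1 : Int) + p.1).toNat q.2) (v + p.1))
              else s
            if (q.2 : Int) + p.2 < m + 1 then
              set3 dp2 (t+1) q.1 ((q.2 : Int) + p.2).toNat
                (optMin (get3 dp2 (t+1) q.1 ((q.2 : Int) + p.2).toNat) v)
            else dp2) = s := by rw [hread, hv]
        rw [hbody]
        exact ⟨S1, S2, fun x y => by
          rw [S3 x y, ← contrib_append_none n.toNat m.toNat p L done q.1 q.2 hv x y]⟩
    | some v =>
        have hbody : (match get3 s t q.1 q.2 with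
          | none => s
          | some v =>
            let dp2 := if (q.1 : Int) + p.1 < n + 1 then
                set3 s (t+1) ((q.1 : Int) + p.1).toNat q.2
                  (optMin (get3 s (t+1) ((q.1 : Int) + p.1).toNat q.2) (v + p.1))
              else s
            if (q.2 : Int) + p.2 < m + 1 then
              set3 dp2 (t+1) q.1 ((q.2 : Int) + p.2).toNat
                (optMin (get3 dp2 (t+1) q.1 ((q.2 : Int) + p.2).toNat) v)
            else dp2) =
          (let dp2 := if (q.1 : Int) + p.1 < n + 1 then
              set3 s (t+1) ((q.1 : Int) + p.1).toNat q.2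
                (optMin (get3 s (t+1) ((q.1 : Int) + p.1).toNat q.2) (v + p.1))
            else s
           if (q.2 : Int) + p.2 < m + 1 then
             set3 dp2 (t+1) q.1 ((q.2 : Int) + p.2).toNat
               (optMin (get3 dp2 (t+1) q.1 ((q.2 : Int) + p.2).toNat) v)
           else dp2) := by rw [hread, hv]
        rw [hbody]
        clear hbody
        by_cases hcA : (q.1 : Int) + p.1 < n + 1
        · have hX : ((q.1 : Int) + p.1).toNat = q.1 + p.1.toNat := by omega
          have hXle : q.1 + p.1.toNat ≤ n.toNat := by omega
          obtain ⟨W1, W2, W3⟩ := write_one k n.toNat m.toNat s dp0 t (q.1 + p.1.toNat) q.2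
            (v + p.1) (contrib n.toNat m.toNat p L done) S1 ht hXle hβle S2 S3
          rw [if_pos hcA, hX]
          by_cases hcB : (q.2 : Int) + p.2 < m + 1
          · have hY : ((q.2 : Int) + p.2).toNat = q.2 + p.2.toNat := by omega
            have hYle : q.2 + p.2.toNat ≤ m.toNat := by omega
            obtain ⟨V1, V2, V3⟩ := write_one k n.toNat m.toNat
              (set3 s (t+1) (q.1 + p.1.toNat) q.2
                (optMin (get3 s (t+1) (q.1 + p.1.toNat) q.2) (v + p.1))) dp0 t
              q.1 (q.2 + p.2.toNat) v _ W1 ht hαle hYle W2 W3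
            rw [if_pos hcB, hY]
            refine ⟨V1, V2, fun x y => ?_⟩
            rw [V3 x y, contrib_append_some n.toNat m.toNat p L done q.1 q.2 v hv hnotin
              hαle hβle x y]
            simp only [hXle, hYle, and_true]
          · have hYgt : ¬ (q.2 + p.2.toNat ≤ m.toNat) := by omega
            rw [if_neg hcB]
            refine ⟨W1, W2, fun x y => ?_⟩
            rw [W3 x y, contrib_append_some n.toNat m.toNat p L done q.1 q.2 v hv hnotin
              hαle hβle x y]
            simp only [hXle, hYgt, and_true, and_false, if_false, ite_false]
        · have hXgt : ¬ (q.1 + p.1.toNat ≤ n.toNat) := by omega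
          rw [if_neg hcA]
          by_cases hcB : (q.2 : Int) + p.2 < m + 1
          · have hY : ((q.2 : Int) + p.2).toNat = q.2 + p.2.toNat := by omega
            have hYle : q.2 + p.2.toNat ≤ m.toNat := by omega
            obtain ⟨V1, V2, V3⟩ := write_one k n.toNat m.toNat s dp0 t
              q.1 (q.2 + p.2.toNat) v (contrib n.toNat m.toNat p L done) S1 ht hαle hYle S2 S3
            rw [if_pos hcB, hY]
            refine ⟨V1, V2, fun x y => ?_⟩
            rw [V3 x y, contrib_append_some n.toNat m.toNat p L done q.1 q.2 v hv hnotin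
              hαle hβle x y]
            simp only [hXgt, hYle, and_true, and_false, if_false, ite_false]
          · have hYgt : ¬ (q.2 + p.2.toNat ≤ m.toNat) := by omega
            rw [if_neg hcB]
            refine ⟨S1, S2, fun x y => ?_⟩
            rw [S3 x y, contrib_append_some n.toNat m.toNat p L done q.1 q.2 v hv hnotin
              hαle hβle x y]
            simp only [hXgt, hYgt, and_false, if_false, ite_false]

lemma get3_replicate (k nT mT i a b : Nat) :
    get3 (List.replicate k (List.replicate nT (List.replicate mT (none : Option Int)))) i a b
      = none := by
  simp only [get3, List.getD_eq_getElem?_getD]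
  simp [List.getElem?_replicate]
  split_ifs <;> simp [List.getElem?_replicate] <;> split_ifs <;> simp

lemma Shape_replicate (k nT mT : Nat) :
    Shape k nT mT
      (List.replicate (k+1) (List.replicate (nT+1) (List.replicate (mT+1) (none : Option Int)))) := by
  refine ⟨by simp, ?_⟩
  intro l hl
  rw [List.eq_of_mem_replicate hl]
  refine ⟨by simp, ?_⟩
  intro r hr
  rw [List.eq_of_mem_replicate hr]
  simp

lemma range_decomp (k : Nat) (done : List Nat) (q : Nat) (rest : List Nat)
    (heq : List.range k = done ++ q :: rest) : q = done.length ∧ done.length < k := by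
  have hlen : done.length < k := by
    have := congrArg List.length heq
    simp at this
    omega
  refine ⟨?_, hlen⟩
  have h1 : (List.range k)[done.length]? = some done.length := by
    simp [List.getElem?_range, hlen]
  rw [heq, List.getElem?_append_right (Nat.le_refl _)] at h1
  simp only [Nat.sub_self, List.getElem?_cons_zero, Option.some_inj] at h1
  exact h1

/- the inner scan of the final double loop -/
lemma scan_inner (LK : Nat → Nat → Option Int)
    (hval : ∀ a b v, LK a b = some v → v = (a : Int)) (a : Nat) (mT : Nat) :
    ∀ r, (List.range mT).foldl (fun r b =>
        match r, LK a b with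
        | none, o => o
        | some c, none => some c
        | some c, some v => some (min c v)) r =
      if ∃ b, b < mT ∧ LK a b ≠ none then omin2 r (some (a : Int)) else r := by
  induction mT with
  | zero => intro r; simp
  | succ mT ih =>
      intro r
      rw [List.range_succ, List.foldl_append, ih r, List.foldl_cons, List.foldl_nil]
      have hstep : ∀ r' : Option Int,
          (match r', LK a mT with
           | none, o => o
           | some c, none => some c
           | some c, some v => some (min c v)) = omin2 r' (LK a mT) := by
        intro r'; cases r' <;> cases LK a mT <;> rfl
      rw [hstep]
      by_cases hm : ∃ b, b < mT ∧ LK a b ≠ none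
      · rw [if_pos hm, if_pos (by obtain ⟨b, hb, hne⟩ := hm; exact ⟨b, by omega, hne⟩)]
        cases hLK : LK a mT with
        | none => rw [omin2_none_right]
        | some v =>
            rw [hval a mT v hLK]
            cases r <;> simp [omin2, min_assoc]
      · rw [if_neg hm]
        cases hLK : LK a mT with
        | none =>
            rw [omin2_none_right, if_neg ?_]
            rintro ⟨b, hb, hne⟩
            rcases Nat.lt_succ_iff_lt_or_eq.1 hb with h' | rfl
            · exact hm ⟨b, h', hne⟩
            · exact hne hLK
        | some v =>
            rw [hval a mT v hLK, if_pos ⟨mT, Nat.lt_succ_self _, by rw [hLK]; exact fun h => by cases h⟩]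
  termination_by mT

/- the outer scan -/
lemma scan_outer (LK : Nat → Nat → Option Int)
    (hval : ∀ a b v, LK a b = some v → v = (a : Int)) (mT : Nat) (nT : Nat) :
    (List.range nT).foldl (fun r a => (List.range mT).foldl (fun r b =>
        match r, LK a b with
        | none, o => o
        | some c, none => some c
        | some c, some v => some (min c v)) r) none =
      (minOpt (fun a => ∃ b, b < mT ∧ LK a b ≠ none) nT).map (fun a : Nat => (a : Int)) := by
  induction nT with
  | zero => simp [minOpt_zero]
  | succ nT ih =>
      rw [List.range_succ, List.foldl_append, ih, List.foldl_cons, List.foldl_nil,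
        scan_inner LK hval, minOpt_succ]
      by_cases hEx : ∃ b, b < mT ∧ LK nT b ≠ none
      · rw [if_pos hEx]
        cases hmo : minOpt (fun a => ∃ b, b < mT ∧ LK a b ≠ none) nT with
        | none => simp [omin2, hEx]
        | some v =>
            have hv := minOpt_eq_some_iff.mp hmo
            simp only [hEx, if_pos, Option.map_some, omin2]
            have : min (v : Int) (nT : Int) = (v : Int) := by
              have : v < nT := hv.1.1
              omega
            rw [this]
      · rw [if_neg hEx]
        cases hmo : minOpt (fun a => ∃ b, b < mT ∧ LK a b ≠ none) nT with
        | none => simp [hEx]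
        | some v => simp [hEx]
  termination_by nT

/- the whole item loop of A -/
lemma outer_fold (info : List (Int × Int)) (n m : Int) (hn : 0 ≤ n) (hm : 0 ≤ m)
    (hinfo : ∀ q ∈ info, 0 ≤ q.1 ∧ 0 ≤ q.2) :
    ∀ dpF, dpF = (List.range info.length).foldl (fun dp i =>
        let p := info.getD i (0, 0)
        (List.range (n+1).toNat).foldl (fun dp a =>
          (List.range (m+1).toNat).foldl (fun dp b =>
            match get3 dp i a b with
            | none => dp
            | some v =>
              let dp2 := if (a : Int) + p.1 < n + 1 then
                  set3 dp (i+1) ((a : Int) + p.1).toNat b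
                    (optMin (get3 dp (i+1) ((a : Int) + p.1).toNat b) (v + p.1))
                else dp
              if (b : Int) + p.2 < m + 1 then
                set3 dp2 (i+1) a ((b : Int) + p.2).toNat
                  (optMin (get3 dp2 (i+1) a ((b : Int) + p.2).toNat) v)
              else dp2) dp) dp)
        (set3 (List.replicate (info.length + 1)
          (List.replicate (n+1).toNat (List.replicate (m+1).toNat (none : Option Int))))
          0 0 0 (some 0)) →
      ∀ a b, get3 dpF info.length a b = Lt n.toNat m.toNat info a b := by
  intro dpF hdpF
  have e1 : (n+1).toNat = n.toNat + 1 := by omega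
  have e2 : (m+1).toNat = m.toNat + 1 := by omega
  have hShape0 : Shape info.length n.toNat m.toNat
      (set3 (List.replicate (info.length + 1)
        (List.replicate (n+1).toNat (List.replicate (m+1).toNat (none : Option Int))))
        0 0 0 (some 0)) := by
    rw [e1, e2]
    exact Shape_set3 _ _ _ _ _ _ _ _ (Shape_replicate _ _ _) (Nat.zero_le _) (Nat.zero_le _)
      (Nat.zero_le _)
  have hbase2 : ∀ a b, get3 (set3 (List.replicate (info.length + 1)
      (List.replicate (n+1).toNat (List.replicate (m+1).toNat (none : Option Int))))
      0 0 0 (some 0)) 0 a b = Lt n.toNat m.toNat (info.take 0) a b := by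
    intro a b
    rw [List.take_zero]
    show _ = L0 a b
    by_cases hab : a = 0 ∧ b = 0
    · obtain ⟨rfl, rfl⟩ := hab
      rw [e1, e2, get3_set3_same _ _ _ _ _ _ _ _ (Shape_replicate _ _ _) (Nat.zero_le _)
        (Nat.zero_le _) (Nat.zero_le _), L0, if_pos ⟨rfl, rfl⟩]
    · rw [get3_set3_ne _ _ _ _ _ _ _ _ (fun h => hab ⟨h.2.1, h.2.2⟩), L0, if_neg hab,
        get3_replicate]
  have hbase3 : ∀ j a b, 0 < j → get3 (set3 (List.replicate (info.length + 1)
      (List.replicate (n+1).toNat (List.replicate (m+1).toNat (none : Option Int))))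
      0 0 0 (some 0)) j a b = none := by
    intro j a b hj
    rw [get3_set3_ne _ _ _ _ _ _ _ _ (fun h => by omega), get3_replicate]
  have main := foldl_prefix_inv
    (f := fun dp (i : Nat) =>
      let p := info.getD i (0, 0)
      (List.range (n+1).toNat).foldl (fun dp a =>
        (List.range (m+1).toNat).foldl (fun dp b =>
          match get3 dp i a b with
          | none => dp
          | some v =>
            let dp2 := if (a : Int) + p.1 < n + 1 then
                set3 dp (i+1) ((a : Int) + p.1).toNat b
                  (optMin (get3 dp (i+1) ((a : Int) + p.1).toNat b) (v + p.1))
              else dp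
            if (b : Int) + p.2 < m + 1 then
              set3 dp2 (i+1) a ((b : Int) + p.2).toNat
                (optMin (get3 dp2 (i+1) a ((b : Int) + p.2).toNat) v)
            else dp2) dp) dp)
    (ps := List.range info.length)
    (Inv := fun done dp =>
      done.length ≤ info.length ∧
      Shape info.length n.toNat m.toNat dp ∧
      (∀ a b, get3 dp done.length a b = Lt n.toNat m.toNat (info.take done.length) a b) ∧
      (∀ j a b, done.length < j → get3 dp j a b = none))
    ?_ _ [] _ rfl ⟨Nat.zero_le _, hShape0, hbase2, hbase3⟩
  · obtain ⟨_, _, S3, _⟩ := main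
    intro a b
    rw [hdpF]
    have := S3 a b
    rw [List.length_range, List.take_length] at this
    exact this
  · intro done q rest heq s hI
    beta_reduce
    obtain ⟨hle, HS, Hread, Hhigh⟩ := hI
    obtain ⟨hq, hlt⟩ := range_decomp _ _ _ _ heq
    subst hq
    have ht : done.length + 1 ≤ info.length := hlt
    have hpmem : info.getD done.length (0, 0) ∈ info := by
      rw [List.getD_eq_getElem?_getD, List.getElem?_eq_getElem hlt, Option.getD_some]
      exact List.getElem_mem hlt
    have hp := hinfo _ hpmem
    obtain ⟨W1, W2, W3⟩ := stepA info.length (info.getD done.length (0, 0)) n m hn hm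
      hp.1 hp.2 done.length ht (Lt n.toNat m.toNat (info.take done.length)) s HS Hread
      (fun x y => Hhigh _ x y (Nat.lt_succ_self _)) _ rfl
    have htake : info.take (done.length + 1) =
        info.take done.length ++ [info.getD done.length (0, 0)] := by
      rw [List.take_succ, List.getElem?_eq_getElem hlt]
      simp [List.getD_eq_getElem?_getD, List.getElem?_eq_getElem hlt]
    refine ⟨by simp; omega, W1, ?_, ?_⟩
    · intro a b
      have : (done ++ [done.length]).length = done.length + 1 := by simp
      rw [this, htake, Lt_append]
      exact W3 a b
    · intro j a b hj
      have hlen : (done ++ [done.length]).length = done.length + 1 := by simp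
      rw [hlen] at hj
      rw [W2 j a b (by omega)]
      exact Hhigh j a b (by omega)

/- final double scan of A, abstractly -/
lemma A_final_eq (dpF : List (List (List (Option Int)))) (info : List (Int × Int))
    (n m : Int) (hinfo : ∀ q ∈ info, 0 ≤ q.1 ∧ 0 ≤ q.2)
    (hlayer : ∀ a b, get3 dpF info.length a b = Lt n.toNat m.toNat info a b) :
    (match (List.range n.toNat).foldl (fun r a => (List.range m.toNat).foldl (fun r b =>
        match r, get3 dpF info.length a b with
        | none, o => o
        | some c, none => some c
        | some c, some v => some (min c v)) r) none with
     | some r => r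
     | none => -1) =
    (match (minOpt (fun a => ∃ b, b < m.toNat ∧ Lt n.toNat m.toNat info a b ≠ none)
        n.toNat).map (fun a : Nat => (a : Int)) with
     | some r => r
     | none => -1) := by
  have hval : ∀ a b v, get3 dpF info.length a b = some v → v = (a : Int) := by
    intro a b v h
    exact Lt_val n.toNat m.toNat info hinfo a b v (by rw [← hlayer]; exact h)
  rw [scan_outer (fun a b => get3 dpF info.length a b) hval m.toNat n.toNat]
  have hiff : ∀ a, a < n.toNat →
      ((∃ b, b < m.toNat ∧ get3 dpF info.length a b ≠ none) ↔
       (∃ b, b < m.toNat ∧ Lt n.toNat m.toNat info a b ≠ none)) := by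
    intro a _
    constructor
    · rintro ⟨b, hb, hne⟩; exact ⟨b, hb, by rw [← hlayer]; exact hne⟩
    · rintro ⟨b, hb, hne⟩; exact ⟨b, hb, by rw [hlayer]; exact hne⟩
  rw [minOpt_congr hiff]

/- characterization of A -/
lemma A_char (info : List (Int × Int)) (n m : Int) (hn : 0 ≤ n) (hm : 0 ≤ m)
    (hinfo : ∀ q ∈ info, 0 ≤ q.1 ∧ 0 ≤ q.2) :
    solution info n m =
      (match (minOpt (fun a => ∃ b, b < m.toNat ∧ Lt n.toNat m.toNat info a b ≠ none)
          n.toNat).map (fun a : Nat => (a : Int)) with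
       | some r => r
       | none => -1) := by
  simp only [solution]
  exact A_final_eq _ info n m hinfo (outer_fold info n m hn hm hinfo _ rfl)

/- ===== B side ===== -/
def Acontrib (n : Int) (p1 : Int) (c : Option Int) : Option Int :=
  match c with
  | some v => if v + p1 ≤ n - 1 then some (v + p1) else none
  | none => none

def bcontrib (n : Int) (g : Nat → Option Int) (p : Int × Int) (pi y : Nat) : Option Int :=
  omin2 (if y < pi then Acontrib n p.1 (g y) else none)
        (if p.2.toNat ≤ y ∧ y - p.2.toNat < pi then g (y - p.2.toNat) else none)

/- column minima of A's layers: what B's 1-D array stores -/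
def MB (n m : Int) (pre : List (Int × Int)) (j : Nat) : Option Int :=
  (minOpt (fun a => Lt n.toNat m.toNat pre a j ≠ none) n.toNat).map (fun a : Nat => (a : Int))

lemma MB_nil (n m : Int) (hn1 : 1 ≤ n) (j : Nat) :
    MB n m [] j = if j = 0 then some 0 else none := by
  unfold MB Lt
  rw [List.foldl_nil]
  by_cases hj : j = 0
  · subst hj
    rw [if_pos rfl]
    have : minOpt (fun a => L0 a 0 ≠ none) n.toNat = some 0 := by
      rw [minOpt_eq_some_iff]
      exact ⟨⟨by omega, by simp [L0]⟩, fun b hb => absurd hb (Nat.not_lt_zero b)⟩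
    rw [this]
    rfl
  · rw [if_neg hj]
    have : minOpt (fun a => L0 a j ≠ none) n.toNat = none := by
      rw [minOpt_eq_none_iff]
      intro a _ h
      exact h (by simp [L0, hj])
    rw [this]
    rfl

/- the key recurrence: one item updates the column minima exactly as B does -/
lemma MB_step (n m : Int) (pre : List (Int × Int)) (p : Int × Int)
    (hp1 : 0 ≤ p.1) (hp2 : 0 ≤ p.2) (hn1 : 1 ≤ n) (j : Nat) (hj : j < m.toNat) :
    MB n m (pre ++ [p]) j =
      omin2 (Acontrib n p.1 (MB n m pre j))
            (if p.2.toNat ≤ j then MB n m pre (j - p.2.toNat) else none) := by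
  unfold MB
  have hcongr : minOpt (fun a => Lt n.toNat m.toNat (pre ++ [p]) a j ≠ none) n.toNat =
      minOpt (fun a => (p.1.toNat ≤ a ∧ Lt n.toNat m.toNat pre (a - p.1.toNat) j ≠ none) ∨
        (p.2.toNat ≤ j ∧ Lt n.toNat m.toNat pre a (j - p.2.toNat) ≠ none)) n.toNat := by
    apply minOpt_congr
    intro a ha
    rw [Lt_append]
    show omin2 _ _ ≠ none ↔ _
    constructor
    · intro h
      rcases (omin2_ne_none _ _).1 h with h' | h'
      · by_cases hG : p.1.toNat ≤ a ∧ a ≤ n.toNat ∧ j ≤ m.toNat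
        · rw [if_pos hG] at h'
          refine Or.inl ⟨hG.1, fun hnone => h' ?_⟩
          rw [hnone]; rfl
        · rw [if_neg hG] at h'; exact absurd rfl h'
      · by_cases hG : p.2.toNat ≤ j ∧ j ≤ m.toNat ∧ a ≤ n.toNat
        · rw [if_pos hG] at h'
          exact Or.inr ⟨hG.1, h'⟩
        · rw [if_neg hG] at h'; exact absurd rfl h'
    · intro h
      apply (omin2_ne_none _ _).2
      rcases h with ⟨h1, h2⟩ | ⟨h1, h2⟩
      · refine Or.inl ?_
        rw [if_pos ⟨h1, by omega, by omega⟩]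
        simp only [ne_eq, Option.map_eq_none_iff]
        exact h2
      · refine Or.inr ?_
        rw [if_pos ⟨h1, by omega, by omega⟩]
        exact h2
  rw [hcongr, minOpt_or, ← ominN_map_cast]
  congr 1
  · rw [minOpt_shift (R := fun c => Lt n.toNat m.toNat pre c j ≠ none) p.1.toNat n.toNat]
    cases hr : minOpt (fun c => Lt n.toNat m.toNat pre c j ≠ none) n.toNat with
    | none => rfl
    | some v =>
        simp only []
        by_cases hc : v + p.1.toNat < n.toNat
        · rw [if_pos hc]
          have hv' : ((v : Int) + p.1 ≤ n - 1) := by omega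
          simp only [Option.map_some, Acontrib, if_pos hv']
          congr 1
          omega
        · rw [if_neg hc]
          have hv' : ¬ ((v : Int) + p.1 ≤ n - 1) := by omega
          simp only [Option.map_some, Acontrib, if_neg hv', Option.map_none]
  · by_cases hb : p.2.toNat ≤ j
    · rw [if_pos hb]
      rw [minOpt_congr (fun a _ => ⟨fun h => h.2, fun h => ⟨hb, h⟩⟩)]
    · rw [if_neg hb]
      rw [minOpt_eq_none_iff.mpr (fun a _ h => hb h.1)]
      rfl

lemma cond_write (l : List (Option Int)) (t : Nat) (w : Int) (cond : Bool)
    (ht : cond = true → t < l.length) (y : Nat) :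
    (if cond && (match l.getD t none with
                 | none => true
                 | some c => decide (w < c)) then l.set t (some w) else l).getD y none
      = if y = t then (if cond then omin2 (l.getD t none) (some w) else l.getD t none)
        else l.getD y none := by
  cases cond with
  | false =>
      by_cases hy : y = t
      · subst hy; simp
      · simp [hy]
  | true =>
      cases hc : l.getD t none with
      | none =>
          by_cases hy : y = t
          · subst hy
            simp [List.getD_eq_getElem?_getD, List.getElem?_set_self, ht rfl, omin2]
          · simp [List.getD_eq_getElem?_getD, List.getElem?_set_ne (fun h => hy h.symm), hy]
      | some c =>
          by_cases hw : w < c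
          · by_cases hy : y = t
            · subst hy
              simp [hw, List.getD_eq_getElem?_getD, List.getElem?_set_self, ht rfl, omin2,
                min_eq_right hw.le]
            · simp [hw, List.getD_eq_getElem?_getD, List.getElem?_set_ne (fun h => hy h.symm), hy]
          · by_cases hy : y = t
            · subst hy
              rw [if_neg (by simp [hw]), hc, if_pos rfl, if_pos rfl]
              simp [omin2, min_eq_left (not_lt.1 hw)]
            · rw [if_neg (by simp [hw]), if_neg hy]

lemma enum_decomp (dp : List (Option Int)) (done : List (Int × Option Int))
    (q : Int × Option Int) (rest : List (Int × Option Int))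
    (heq : PySem.List.enumerate dp = done ++ q :: rest) :
    q.1 = (done.length : Int) ∧ q.2 = dp.getD done.length none ∧ done.length < dp.length := by
  have hlen : done.length < dp.length := by
    have := congrArg List.length heq
    rw [PySem.List.length_enumerate] at this
    simp at this
    omega
  have h1 : (PySem.List.enumerate dp)[done.length]? = some q := by
    rw [heq, List.getElem?_append_right (Nat.le_refl _)]
    simp
  rw [PySem.List.getElem?_enumerate, List.getElem?_eq_getElem hlen] at h1
  simp only [Option.map_some, Option.some_inj] at h1
  rw [← h1]
  refine ⟨by simp, ?_, hlen⟩
  simp [List.getD_eq_getElem?_getD, List.getElem?_eq_getElem hlen]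

lemma bcontrib_succ_none (n : Int) (g : Nat → Option Int) (p : Int × Int) (pi y : Nat)
    (hv : g pi = none) : bcontrib n g p (pi+1) y = bcontrib n g p pi y := by
  unfold bcontrib
  congr 1
  · split_ifs with hA hB
    · rfl
    · rw [(by omega : y = pi), hv]
      rfl
    · omega
    · rfl
  · by_cases hb : p.2.toNat ≤ y
    · by_cases hlt : y - p.2.toNat < pi
      · rw [if_pos ⟨hb, by omega⟩, if_pos ⟨hb, hlt⟩]
      · by_cases heq2 : y - p.2.toNat = pi
        · rw [if_pos ⟨hb, by omega⟩, if_neg (by rintro ⟨_, h'⟩; omega), heq2, hv]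
        · rw [if_neg (by rintro ⟨_, h'⟩; omega), if_neg (by rintro ⟨_, h'⟩; omega)]
    · rw [if_neg (fun h => hb h.1), if_neg (fun h => hb h.1)]

/- the two conditional writes B performs for one source cell -/
lemma B_two_writes (n m : Int) (p : Int × Int) (hp2 : 0 ≤ p.2) (hm1 : 1 ≤ m)
    (g : Nat → Option Int) (pi : Nat) (v : Int) (s s1 s2 : List (Option Int))
    (hslen : s.length = m.toNat) (hpi : pi < m.toNat)
    (hsval : ∀ y, y < m.toNat → s.getD y none = bcontrib n g p pi y)
    (hv : g pi = some v)
    (hs1 : s1 = if decide (v + p.1 ≤ n - 1) && (match s.getD pi none with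
        | none => true
        | some c => decide (v + p.1 < c)) then s.set pi (some (v + p.1)) else s)
    (hs2 : s2 = if decide ((pi : Int) + p.2 ≤ m - 1) && (match s1.getD (pi + p.2.toNat) none with
        | none => true
        | some c => decide (v < c)) then s1.set (pi + p.2.toNat) (some v) else s1) :
    s2.length = m.toNat ∧
    ∀ y, y < m.toNat → s2.getD y none = bcontrib n g p (pi+1) y := by
  have hs1len : s1.length = m.toNat := by rw [hs1]; split_ifs <;> simp [hslen]
  have h1 : ∀ y, s1.getD y none =
      if y = pi then (if decide (v + p.1 ≤ n - 1) then omin2 (s.getD pi none) (some (v + p.1))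
        else s.getD pi none) else s.getD y none := by
    intro y
    rw [hs1]
    exact cond_write s pi (v + p.1) _ (fun _ => by omega) y
  have h2 : ∀ y, s2.getD y none =
      if y = pi + p.2.toNat then
        (if decide ((pi : Int) + p.2 ≤ m - 1) then omin2 (s1.getD (pi + p.2.toNat) none) (some v)
          else s1.getD (pi + p.2.toNat) none)
      else s1.getD y none := by
    intro y
    rw [hs2]
    exact cond_write s1 (pi + p.2.toNat) v _
      (fun hc => by
        have := of_decide_eq_true hc
        omega) y
  have hbold_pi : s.getD pi none =
      (if p.2.toNat ≤ pi ∧ pi - p.2.toNat < pi then g (pi - p.2.toNat) else none) := by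
    rw [hsval pi hpi]
    unfold bcontrib
    rw [if_neg (by omega : ¬ pi < pi)]
    cases h : (if p.2.toNat ≤ pi ∧ pi - p.2.toNat < pi then g (pi - p.2.toNat) else none) <;>
      simp [omin2, h]
  refine ⟨by rw [hs2]; split_ifs <;> simp [hs1len], ?_⟩
  intro y hy
  rw [h2 y]
  by_cases hyB : y = pi + p.2.toNat
  · subst hyB
    have hdecB : ((pi : Int) + p.2 ≤ m - 1) := by omega
    rw [if_pos rfl, decide_eq_true hdecB, if_pos rfl, h1 (pi + p.2.toNat)]
    by_cases hbz : p.2.toNat = 0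
    · -- the two writes hit the same cell
      have e : pi + p.2.toNat = pi := by omega
      rw [e, if_pos rfl, hbold_pi,
        if_neg (show ¬ (p.2.toNat ≤ pi ∧ pi - p.2.toNat < pi) from by rintro ⟨_, h'⟩; omega)]
      unfold bcontrib
      rw [if_pos (by omega : pi < pi + 1),
        if_pos (show p.2.toNat ≤ pi ∧ pi - p.2.toNat < pi + 1 from ⟨by omega, by omega⟩),
        (by omega : pi - p.2.toNat = pi), hv]
      simp only [Acontrib]
      by_cases hca : v + p.1 ≤ n - 1
      · rw [decide_eq_true hca, if_pos rfl, if_pos hca]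
        rfl
      · rw [decide_eq_false hca, if_neg (by simp), if_neg hca]
    · -- distinct cells
      rw [if_neg (by omega : ¬ pi + p.2.toNat = pi)]
      have hbold : s.getD (pi + p.2.toNat) none = none := by
        rw [hsval _ hy]
        unfold bcontrib
        rw [if_neg (by omega : ¬ pi + p.2.toNat < pi),
          if_neg (by rintro ⟨h1', h2'⟩; omega)]
        rfl
      rw [hbold]
      unfold bcontrib
      rw [if_neg (by omega : ¬ pi + p.2.toNat < pi + 1),
        if_pos (⟨by omega, by omega⟩ : p.2.toNat ≤ pi + p.2.toNat ∧
          pi + p.2.toNat - p.2.toNat < pi + 1),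
        (by omega : pi + p.2.toNat - p.2.toNat = pi), hv]
  · rw [if_neg hyB, h1 y]
    by_cases hyA : y = pi
    · subst hyA
      have hbnz : p.2.toNat ≠ 0 := fun h => hyB (by omega)
      rw [if_pos rfl, hbold_pi]
      unfold bcontrib
      rw [if_pos (by omega : y < y + 1), hv]
      have hBsame : (if p.2.toNat ≤ y ∧ y - p.2.toNat < y + 1 then g (y - p.2.toNat) else none)
          = (if p.2.toNat ≤ y ∧ y - p.2.toNat < y then g (y - p.2.toNat) else none) := by
        by_cases h : p.2.toNat ≤ y
        · rw [if_pos ⟨h, by omega⟩, if_pos ⟨h, by omega⟩]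
        · rw [if_neg (fun hh => h hh.1), if_neg (fun hh => h hh.1)]
      rw [hBsame]
      simp only [Acontrib]
      by_cases hca : v + p.1 ≤ n - 1
      · rw [decide_eq_true hca, if_pos rfl, if_pos hca]
        cases h : (if p.2.toNat ≤ y ∧ y - p.2.toNat < y then g (y - p.2.toNat) else none) <;>
          simp [omin2, min_comm]
      · rw [decide_eq_false hca, if_neg (by simp), if_neg hca]
        rfl
    · rw [if_neg hyA, hsval y hy]
      unfold bcontrib
      congr 1
      · have h : (y < pi + 1) ↔ (y < pi) := by omega
        simp only [h]
      · by_cases hb : p.2.toNat ≤ y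
        · by_cases hlt : y - p.2.toNat < pi
          · rw [if_pos ⟨hb, hlt⟩, if_pos ⟨hb, by omega⟩]
          · rw [if_neg (by rintro ⟨hb', h'⟩; omega), if_neg (by rintro ⟨hb', h'⟩; omega)]
        · rw [if_neg (fun h => hb h.1), if_neg (fun h => hb h.1)]

/- one item of B's loop, via the enumerate fold -/
lemma B_item (n m : Int) (p : Int × Int) (hp2 : 0 ≤ p.2) (hm1 : 1 ≤ m)
    (dp : List (Option Int)) (hlen : dp.length = m.toNat) :
    ∀ new, new = (PySem.List.enumerate dp).foldl (fun new jv =>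
        match jv.2 with
        | none => new
        | some v =>
          let new2 := if v + p.1 ≤ n - 1 && (match new.getD jv.1.toNat none with
              | none => true
              | some c => decide (v + p.1 < c)) then new.set jv.1.toNat (some (v + p.1)) else new
          let jb := jv.1 + p.2
          if jb ≤ m - 1 && (match new2.getD jb.toNat none with
              | none => true
              | some c => decide (v < c)) then new2.set jb.toNat (some v) else new2)
        (List.replicate m.toNat (none : Option Int)) →
      new.length = m.toNat ∧
      ∀ y, y < m.toNat → new.getD y none = bcontrib n (fun j => dp.getD j none) p m.toNat y := by
  intro new hnew
  have main := foldl_prefix_inv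
    (f := fun (new : List (Option Int)) (jv : Int × Option Int) =>
      match jv.2 with
      | none => new
      | some v =>
        let new2 := if v + p.1 ≤ n - 1 && (match new.getD jv.1.toNat none with
            | none => true
            | some c => decide (v + p.1 < c)) then new.set jv.1.toNat (some (v + p.1)) else new
        let jb := jv.1 + p.2
        if jb ≤ m - 1 && (match new2.getD jb.toNat none with
            | none => true
            | some c => decide (v < c)) then new2.set jb.toNat (some v) else new2)
    (ps := PySem.List.enumerate dp)
    (Inv := fun done l => l.length = m.toNat ∧ ∀ y, y < m.toNat →
      l.getD y none = bcontrib n (fun j => dp.getD j none) p done.length y)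
    ?hstep _ [] (List.replicate m.toNat (none : Option Int)) rfl ⟨by simp, ?base⟩
  rw [hnew]
  refine ⟨main.1, fun y hy => ?_⟩
  have hmm2 := main.2 y hy
  rwa [PySem.List.length_enumerate, hlen] at hmm2
  case base =>
    intro y hy
    rw [List.getD_eq_getElem?_getD, List.getElem?_replicate]
    unfold bcontrib
    simp only [List.length_nil]
    rw [if_neg (show ¬ y < 0 by omega),
      if_neg (show ¬ (p.2.toNat ≤ y ∧ y - p.2.toNat < 0) from fun h => by omega)]
    split_ifs <;> rfl
  case hstep =>
    intro done q rest heq s hI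
    beta_reduce
    obtain ⟨hslen, hsval⟩ := hI
    obtain ⟨hq1, hq2, hpi⟩ := enum_decomp dp done q rest heq
    obtain ⟨qi, qc⟩ := q
    simp only [] at hq1 hq2
    subst hq1
    subst hq2
    have hLlen : ∀ z : Int × Option Int, (done ++ [z]).length = done.length + 1 := by
      intro z; simp
    cases hv : dp.getD done.length none with
    | none =>
        refine ⟨hslen, fun y hy => ?_⟩
        rw [hLlen, bcontrib_succ_none n (fun j => dp.getD j none) p done.length y hv]
        exact hsval y hy
    | some v =>
        have hpim : done.length < m.toNat := by omega
        simp only [Int.toNat_natCast]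
        rw [show ((done.length : Int) + p.2).toNat = done.length + p.2.toNat by omega]
        obtain ⟨W1, W2⟩ := B_two_writes n m p hp2 hm1 (fun j => dp.getD j none)
          done.length v s _ _ hslen hpim hsval hv rfl rfl
        refine ⟨W1, fun y hy => ?_⟩
        rw [hLlen]
        exact W2 y hy

/- the whole item loop of B -/
lemma B_fold (info : List (Int × Int)) (n m : Int) (hn1 : 1 ≤ n) (hm1 : 1 ≤ m)
    (hinfo : ∀ q ∈ info, 0 ≤ q.1 ∧ 0 ≤ q.2) :
    ∀ dpF, dpF = info.foldl (fun dp p =>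
        (PySem.List.enumerate dp).foldl (fun new jv =>
          match jv.2 with
          | none => new
          | some v =>
            let new2 := if v + p.1 ≤ n - 1 && (match new.getD jv.1.toNat none with
                | none => true
                | some c => decide (v + p.1 < c)) then new.set jv.1.toNat (some (v + p.1)) else new
            let jb := jv.1 + p.2
            if jb ≤ m - 1 && (match new2.getD jb.toNat none with
                | none => true
                | some c => decide (v < c)) then new2.set jb.toNat (some v) else new2)
          (List.replicate m.toNat (none : Option Int)))
        ((List.replicate m.toNat (none : Option Int)).set 0 (some 0)) →
      dpF.length = m.toNat ∧ ∀ j, j < m.toNat → dpF.getD j none = MB n m info j := by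
  intro dpF hdpF
  have main := foldl_prefix_inv
    (f := fun (dp : List (Option Int)) (p : Int × Int) =>
      (PySem.List.enumerate dp).foldl (fun new jv =>
        match jv.2 with
        | none => new
        | some v =>
          let new2 := if v + p.1 ≤ n - 1 && (match new.getD jv.1.toNat none with
              | none => true
              | some c => decide (v + p.1 < c)) then new.set jv.1.toNat (some (v + p.1)) else new
          let jb := jv.1 + p.2
          if jb ≤ m - 1 && (match new2.getD jb.toNat none with
              | none => true
              | some c => decide (v < c)) then new2.set jb.toNat (some v) else new2)
        (List.replicate m.toNat (none : Option Int)))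
    (ps := info)
    (Inv := fun done dp => dp.length = m.toNat ∧
      ∀ j, j < m.toNat → dp.getD j none = MB n m done j)
    ?hstep2 _ [] ((List.replicate m.toNat (none : Option Int)).set 0 (some 0)) rfl
    ⟨by simp, ?base2⟩
  · rw [hdpF]
    exact main
  case base2 =>
    intro j hj
    by_cases hj0 : j = 0
    · subst hj0
      rw [getD_set_self (List.replicate m.toNat (none : Option Int)) 0 (some 0) none
        (by simp; omega), MB_nil n m hn1 0, if_pos rfl]
    · rw [getD_set_ne _ _ _ _ _ hj0, List.getD_eq_getElem?_getD, List.getElem?_replicate,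
        MB_nil n m hn1 j, if_neg hj0]
      split_ifs <;> rfl
  case hstep2 =>
    intro done q rest heq s hI
    beta_reduce
    obtain ⟨hslen, hsval⟩ := hI
    have hqmem : q ∈ info := by rw [heq]; simp
    have hq := hinfo q hqmem
    obtain ⟨W1, W2⟩ := B_item n m q hq.2 hm1 s hslen _ rfl
    refine ⟨W1, fun j hj => ?_⟩
    rw [W2 j hj, MB_step n m done q hq.1 hq.2 hn1 j hj]
    unfold bcontrib
    beta_reduce
    rw [if_pos hj, hsval j hj]
    congr 1
    by_cases hb : q.2.toNat ≤ j
    · rw [if_pos ⟨hb, by omega⟩, if_pos hb, hsval _ (by omega)]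
    · rw [if_neg (fun h => hb h.1), if_neg hb]

lemma best_step (b v : Option Int) :
    (match v with
     | none => b
     | some v => match b with
                 | none => some v
                 | some bb => if v < bb then some v else some bb) = omin2 b v := by
  cases v with
  | none => cases b <;> rfl
  | some v =>
      cases b with
      | none => rfl
      | some bb =>
          by_cases h : v < bb
          · simp [h, omin2, min_eq_right h.le]
          · simp [h, omin2, min_eq_left (not_lt.1 h)]

lemma foldl_getD (l : List (Option Int)) (f : Option Int → Option Int → Option Int)
    (init : Option Int) :
    l.foldl f init = (List.range l.length).foldl (fun acc j => f acc (l.getD j none)) init := by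
  induction l generalizing init with
  | nil => rfl
  | cons x xs ih =>
      rw [List.foldl_cons, ih, List.length_cons, List.range_succ_eq_map, List.foldl_cons,
        List.foldl_map]
      simp only [List.getD_cons_zero, List.getD_cons_succ]

lemma fold_union (nT : Nat) (P : Nat → Nat → Prop) [inst : ∀ j, DecidablePred (fun a => P a j)]
    (F : Nat → Option Int) :
    ∀ (mT : Nat) [instE : DecidablePred (fun a => ∃ j, j < mT ∧ P a j)],
      (∀ j, j < mT → F j = (minOpt (fun a => P a j) nT).map (fun a : Nat => (a : Int))) →
      (List.range mT).foldl (fun acc j => omin2 acc (F j)) none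
        = (minOpt (fun a => ∃ j, j < mT ∧ P a j) nT).map (fun a : Nat => (a : Int)) := by
  intro mT
  induction mT with
  | zero =>
      intro instE _
      rw [List.range_zero, List.foldl_nil,
        minOpt_eq_none_iff.mpr (fun a ha => by rintro ⟨j, hj, _⟩; omega)]
      rfl
  | succ mT ih =>
      intro instE hF
      rw [List.range_succ, List.foldl_append, List.foldl_cons, List.foldl_nil,
        ih (fun j hj => hF j (by omega)), hF mT (Nat.lt_succ_self _), ominN_map_cast]
      congr 1
      rw [← minOpt_or]
      apply minOpt_congr
      intro a ha
      constructor
      · rintro (⟨j, hj, hP⟩ | hP)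
        · exact ⟨j, by omega, hP⟩
        · exact ⟨mT, Nat.lt_succ_self _, hP⟩
      · rintro ⟨j, hj, hP⟩
        rcases Nat.lt_succ_iff_lt_or_eq.1 hj with h' | rfl
        · exact Or.inl ⟨j, h', hP⟩
        · exact Or.inr hP

/- characterization of B -/
lemma B_char (info : List (Int × Int)) (n m : Int) (hn1 : 1 ≤ n) (hm1 : 1 ≤ m)
    (hinfo : ∀ q ∈ info, 0 ≤ q.1 ∧ 0 ≤ q.2) :
    solution_alt info n m =
      (match (minOpt (fun a => ∃ b, b < m.toNat ∧ Lt n.toNat m.toNat info a b ≠ none)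
          n.toNat).map (fun a : Nat => (a : Int)) with
       | some r => r
       | none => -1) := by
  simp only [solution_alt]
  rw [if_neg (by omega : ¬ (n ≤ 0 ∨ m ≤ 0))]
  obtain ⟨hL, hV⟩ := B_fold info n m hn1 hm1 hinfo _ rfl
  rw [show (fun (best : Option Int) (v : Option Int) =>
      match v with
      | none => best
      | some v => match best with
                  | none => some v
                  | some b => if v < b then some v else some b) = fun best v => omin2 best v from
    funext fun b => funext fun v => best_step b v]
  rw [foldl_getD, hL,
    fold_union n.toNat (fun a j => Lt n.toNat m.toNat info a j ≠ none) _ m.toNat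
      (fun j hj => by rw [hV j hj]; rfl)]

theorem solution_spec : Claim_equal_solution := by
  intro info n m _ hpre
  obtain ⟨hn, hm, hinfo⟩ := hpre
  show solution info n m = solution_alt info n m
  by_cases hsmall : n ≤ 0 ∨ m ≤ 0
  · have hB : solution_alt info n m = -1 := by
      simp only [solution_alt]
      rw [if_pos hsmall]
    rw [hB, A_char info n m hn hm hinfo]
    have hnone : minOpt (fun a => ∃ b, b < m.toNat ∧ Lt n.toNat m.toNat info a b ≠ none)
        n.toNat = none := by
      rw [minOpt_eq_none_iff]
      intro a ha
      rcases hsmall with h | h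
      · exact absurd ha (by omega)
      · rintro ⟨b, hb, _⟩
        omega
    rw [hnone]
    rfl
  · have h' := not_or.mp hsmall
    have hn1 : 1 ≤ n := by omega
    have hm1 : 1 ≤ m := by omega
    rw [A_char info n m hn hm hinfo, B_char info n m hn1 hm1 hinfo]
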